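-- pv_equiv track=rewrite | github.com/douavocado/humanchessplayer | model_tester.py | convert_position_prediction
-- ===== SOURCE A (Python) =====
-- def convert_position_prediction(output_board_one_hot):
--     square_one_hot = []
--     squares = []
--     for i, element in enumerate(output_board_one_hot):
--         square_one_hot.append(element)
--         if (i+1) % 12 == 0:
--             squares.append(square_one_hot)
--             square_one_hot = []
--
--     builder = []
--     for i, piece_one_hot in enumerate(squares):
--         if piece_one_hot == [0, 0, 0, 0, 0, 0, 0, 0, 0, 0, 0, 0]:
--             builder.append('.')
--         elif piece_one_hot == [1, 0, 0, 0, 0, 0, 0, 0, 0, 0, 0, 0]: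
--             builder.append('p')
--         elif piece_one_hot == [0, 1, 0, 0, 0, 0, 0, 0, 0, 0, 0, 0]:
--             builder.append('n')
--         elif piece_one_hot == [0, 0, 1, 0, 0, 0, 0, 0, 0, 0, 0, 0]:
--             builder.append('b')
--         elif piece_one_hot == [0, 0, 0, 1, 0, 0, 0, 0, 0, 0, 0, 0]:
--             builder.append('r')
--         elif piece_one_hot == [0, 0, 0, 0, 1, 0, 0, 0, 0, 0, 0, 0]:
--             builder.append('q')
--         elif piece_one_hot == [0, 0, 0, 0, 0, 1, 0, 0, 0, 0, 0, 0]: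
--             builder.append('k')
--         elif piece_one_hot == [0, 0, 0, 0, 0, 0, 1, 0, 0, 0, 0, 0]:
--             builder.append('P')
--         elif piece_one_hot == [0, 0, 0, 0, 0, 0, 0, 1, 0, 0, 0, 0]:
--             builder.append('N')
--         elif piece_one_hot == [0, 0, 0, 0, 0, 0, 0, 0, 1, 0, 0, 0]:
--             builder.append('B')
--         elif piece_one_hot == [0, 0, 0, 0, 0, 0, 0, 0, 0, 1, 0, 0]:
--             builder.append('R')
--         elif piece_one_hot == [0, 0, 0, 0, 0, 0, 0, 0, 0, 0, 1, 0]: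
--             builder.append('Q')
--         elif piece_one_hot == [0, 0, 0, 0, 0, 0, 0, 0, 0, 0, 0, 1]:
--             builder.append('K')
--         if (i+1) % 8 == 0:
--             builder.append('\n')
--         else:
--             builder.append(' ')
--
--     return (''.join(builder))
-- ===== SOURCE B (Python) =====
-- def convert_position_prediction(output_board_one_hot):
--     pieces = []
--     for i in range(len(output_board_one_hot) // 12):
--         sq = output_board_one_hot[12 * i : 12 * i + 12]
--         if sq.count(0) == 12:
--             pieces.append('.')
--         elif sq.count(0) == 11 and sq.count(1) == 1:
--             pieces.append("pnbrqkPNBRQK"[sq.index(1)])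
--         pieces.append('\n' if (i + 1) % 8 == 0 else ' ')
--     return ''.join(pieces)
-- ===== Notes on version B (the rewrite author's own statement) =====
-- stated objective: faster
-- what changed: B makes a single indexed pass slicing each 12-element square out of the input and classifying it by its 0/1 counts and the position of its set bit, instead of A's two-phase index-driven regrouping followed by 13 whole-vector equality comparisons per square.
import Mathlib
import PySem

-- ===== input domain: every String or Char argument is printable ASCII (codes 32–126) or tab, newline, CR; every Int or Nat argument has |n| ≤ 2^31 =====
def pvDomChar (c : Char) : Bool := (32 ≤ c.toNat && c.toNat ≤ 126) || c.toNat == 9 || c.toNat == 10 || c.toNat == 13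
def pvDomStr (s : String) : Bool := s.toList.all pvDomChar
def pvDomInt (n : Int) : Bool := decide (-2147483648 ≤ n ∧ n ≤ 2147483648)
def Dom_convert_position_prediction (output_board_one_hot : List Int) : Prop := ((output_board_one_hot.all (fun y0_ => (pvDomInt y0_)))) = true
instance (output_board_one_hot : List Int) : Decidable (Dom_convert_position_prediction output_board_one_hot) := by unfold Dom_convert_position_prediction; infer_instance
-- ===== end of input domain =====

-- B change (objective: faster, measured): one indexed pass slicing each 12-element
-- square and classifying it by its 0/1 counts and set-bit index, instead of A's regroup-then-13-comparisons.

-- ===== PORT A =====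
-- step of A's first loop: append element to current square, flush every 12th index
-- ((p.1 + 1) % 12 : Int % with positive modulus coincides with Python's %)
def cppAStep1 (st : List Int × List (List Int)) (p : Int × Int) : List Int × List (List Int) :=
  let cur := st.1 ++ [p.2]
  if (p.1 + 1) % 12 == 0 then ([], st.2 ++ [cur]) else (cur, st.2)

-- step of A's second loop: the 13-way equality chain, then the separator
def cppAStep2 (b : List Char) (p : Int × List Int) : List Char :=
  let b :=
    if p.2 = [0, 0, 0, 0, 0, 0, 0, 0, 0, 0, 0, 0] then b ++ ['.']
    else if p.2 = [1, 0, 0, 0, 0, 0, 0, 0, 0, 0, 0, 0] then b ++ ['p']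
    else if p.2 = [0, 1, 0, 0, 0, 0, 0, 0, 0, 0, 0, 0] then b ++ ['n']
    else if p.2 = [0, 0, 1, 0, 0, 0, 0, 0, 0, 0, 0, 0] then b ++ ['b']
    else if p.2 = [0, 0, 0, 1, 0, 0, 0, 0, 0, 0, 0, 0] then b ++ ['r']
    else if p.2 = [0, 0, 0, 0, 1, 0, 0, 0, 0, 0, 0, 0] then b ++ ['q']
    else if p.2 = [0, 0, 0, 0, 0, 1, 0, 0, 0, 0, 0, 0] then b ++ ['k']
    else if p.2 = [0, 0, 0, 0, 0, 0, 1, 0, 0, 0, 0, 0] then b ++ ['P']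
    else if p.2 = [0, 0, 0, 0, 0, 0, 0, 1, 0, 0, 0, 0] then b ++ ['N']
    else if p.2 = [0, 0, 0, 0, 0, 0, 0, 0, 1, 0, 0, 0] then b ++ ['B']
    else if p.2 = [0, 0, 0, 0, 0, 0, 0, 0, 0, 1, 0, 0] then b ++ ['R']
    else if p.2 = [0, 0, 0, 0, 0, 0, 0, 0, 0, 0, 1, 0] then b ++ ['Q']
    else if p.2 = [0, 0, 0, 0, 0, 0, 0, 0, 0, 0, 0, 1] then b ++ ['K']
    else b
  if (p.1 + 1) % 8 == 0 then b ++ ['\n'] else b ++ [' ']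

def convert_position_prediction (output_board_one_hot : List Int) : String :=
  let st := (PySem.List.enumerate output_board_one_hot).foldl cppAStep1 ([], [])
  let builder := (PySem.List.enumerate st.2).foldl cppAStep2 []
  String.mk builder

-- ===== PORT B =====
-- classify one 12-element square by its counts; the index into "pnbrqkPNBRQK" is always in
-- range because count(sq,1) = 1, so the getD default is never used (Python indexing succeeds)
def cppAltPiece (sq : List Int) : List Char :=
  if PySem.List.count sq 0 = 12 then ['.']
  else if PySem.List.count sq 0 = 11 ∧ PySem.List.count sq 1 = 1 then
    match PySem.List.index? sq 1 with
    | some j => ["pnbrqkPNBRQK".toList.getD j ' ']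
    | none => []
  else []

-- B's loop body: slice out square i, classify it by counts, then the separator
def cppAltStep (xs : List Int) (pieces : List Char) (i : Int) : List Char :=
  let sq := PySem.List.slice xs (some (12 * i)) (some (12 * i + 12))
  let pieces := pieces ++ cppAltPiece sq
  pieces ++ (if (i + 1) % 8 == 0 then ['\n'] else [' '])

def convert_position_prediction_alt (output_board_one_hot : List Int) : String :=
  String.mk ((PySem.List.pyRange 0 (PySem.Int.floordiv output_board_one_hot.length 12) 1).foldl
    (cppAltStep output_board_one_hot) [])

-- ===== PRECONDITION & SPEC =====
def Spec_convert_position_prediction (output_board_one_hot : List Int) (out : String) : Prop := out = convert_position_prediction_alt output_board_one_hot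
instance (output_board_one_hot : List Int) (out : String) : Decidable (Spec_convert_position_prediction output_board_one_hot out) := by unfold Spec_convert_position_prediction; infer_instance

-- ===== CLAIM (what is proved, stated in full; the proofs are below) =====
def Claim_equal_convert_position_prediction : Prop := ∀ (output_board_one_hot : List Int), Dom_convert_position_prediction output_board_one_hot → Spec_convert_position_prediction output_board_one_hot (convert_position_prediction output_board_one_hot)

-- ===== LEMMAS AND PROOFS =====

-- the list of complete 12-element chunks of xs (trailing remainder dropped)
def cppChunks12 (xs : List Int) : List (List Int) :=
  if 12 ≤ xs.length then xs.take 12 :: cppChunks12 (xs.drop 12) else []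
termination_by xs.length
decreasing_by simp; omega

-- the char list A's second-loop chain contributes for one square
def cppClassifyA (sq : List Int) : List Char :=
  if sq = [0, 0, 0, 0, 0, 0, 0, 0, 0, 0, 0, 0] then ['.']
  else if sq = [1, 0, 0, 0, 0, 0, 0, 0, 0, 0, 0, 0] then ['p']
  else if sq = [0, 1, 0, 0, 0, 0, 0, 0, 0, 0, 0, 0] then ['n']
  else if sq = [0, 0, 1, 0, 0, 0, 0, 0, 0, 0, 0, 0] then ['b']
  else if sq = [0, 0, 0, 1, 0, 0, 0, 0, 0, 0, 0, 0] then ['r']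
  else if sq = [0, 0, 0, 0, 1, 0, 0, 0, 0, 0, 0, 0] then ['q']
  else if sq = [0, 0, 0, 0, 0, 1, 0, 0, 0, 0, 0, 0] then ['k']
  else if sq = [0, 0, 0, 0, 0, 0, 1, 0, 0, 0, 0, 0] then ['P']
  else if sq = [0, 0, 0, 0, 0, 0, 0, 1, 0, 0, 0, 0] then ['N']
  else if sq = [0, 0, 0, 0, 0, 0, 0, 0, 1, 0, 0, 0] then ['B']
  else if sq = [0, 0, 0, 0, 0, 0, 0, 0, 0, 1, 0, 0] then ['R']
  else if sq = [0, 0, 0, 0, 0, 0, 0, 0, 0, 0, 1, 0] then ['Q']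
  else if sq = [0, 0, 0, 0, 0, 0, 0, 0, 0, 0, 0, 1] then ['K']
  else []

def cppRender (f : List Int → List Char) : List (List Int) → Nat → List Char
  | [], _ => []
  | sq :: rest, k => f sq ++ (if (k + 1) % 8 = 0 then ['\n'] else [' ']) ++ cppRender f rest (k + 1)

theorem cppChunks12_nil_of_lt {xs : List Int} (h : xs.length < 12) : cppChunks12 xs = [] := by
  rw [cppChunks12]; simp; omega

theorem cppChunks12_cons (pre rest : List Int) (h : pre.length = 12) :
    cppChunks12 (pre ++ rest) = pre :: cppChunks12 rest := by
  rw [cppChunks12]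
  rw [if_pos (by simp [h])]
  congr 1
  · rw [← h, List.take_left]
  · congr 1; rw [← h, List.drop_left]


theorem cppSep12 (k : Nat) (h : (k + 1) % 12 = 0) : (((k:Int) + 1) % 12 == 0) = true := by
  simp [beq_iff_eq]; omega

theorem cppSep12' (k : Nat) (h : ¬ (k + 1) % 12 = 0) : (((k:Int) + 1) % 12 == 0) = false := by
  simp; omega

theorem cppSep8 (n : Nat) : (if (n:Int) % 8 == 0 then (['\n'] : List Char) else [' '])
    = (if n % 8 = 0 then ['\n'] else [' ']) := by
  by_cases h : n % 8 = 0
  · rw [if_pos h, if_pos]; simp [beq_iff_eq]; omega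
  · rw [if_neg h, if_neg]; simp [beq_iff_eq]; omega

theorem cppLoop1 (xs : List Int) : ∀ (k : Nat) (cur : List Int) (sqs : List (List Int)),
    cur.length = k % 12 →
    ((PySem.List.enumerate xs (k : Int)).foldl cppAStep1 (cur, sqs)).2
      = sqs ++ cppChunks12 (cur ++ xs) := by
  induction xs with
  | nil =>
    intro k cur sqs hcur
    simp [PySem.List.enumerate, cppChunks12_nil_of_lt (by omega : cur.length < 12)]
  | cons x xs ih =>
    intro k cur sqs hcur
    rw [PySem.List.enumerate_cons, List.foldl_cons]
    have hk1 : ((k : Int) + 1) = ((k + 1 : Nat) : Int) := by push_cast; ring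
    by_cases h : (k + 1) % 12 = 0
    · rw [show cppAStep1 (cur, sqs) ((k:Int), x)
            = ([], sqs ++ [cur ++ [x]]) by unfold cppAStep1; rw [cppSep12 k h]; simp]
      rw [hk1, ih (k+1) [] (sqs ++ [cur ++ [x]]) (by simp; omega)]
      simp only [List.nil_append]
      rw [show cur ++ x :: xs = (cur ++ [x]) ++ xs by simp]
      rw [cppChunks12_cons (cur ++ [x]) xs (by simp; omega)]
      simp
    · rw [show cppAStep1 (cur, sqs) ((k:Int), x)
            = (cur ++ [x], sqs) by unfold cppAStep1; rw [cppSep12' k h]; simp]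
      rw [hk1, ih (k+1) (cur ++ [x]) sqs (by simp; omega)]
      rw [show cur ++ x :: xs = (cur ++ [x]) ++ xs by simp]
theorem cppChain_eq (b : List Char) (sq : List Int) :
    (if sq = [0, 0, 0, 0, 0, 0, 0, 0, 0, 0, 0, 0] then b ++ ['.']
    else if sq = [1, 0, 0, 0, 0, 0, 0, 0, 0, 0, 0, 0] then b ++ ['p']
    else if sq = [0, 1, 0, 0, 0, 0, 0, 0, 0, 0, 0, 0] then b ++ ['n']
    else if sq = [0, 0, 1, 0, 0, 0, 0, 0, 0, 0, 0, 0] then b ++ ['b']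
    else if sq = [0, 0, 0, 1, 0, 0, 0, 0, 0, 0, 0, 0] then b ++ ['r']
    else if sq = [0, 0, 0, 0, 1, 0, 0, 0, 0, 0, 0, 0] then b ++ ['q']
    else if sq = [0, 0, 0, 0, 0, 1, 0, 0, 0, 0, 0, 0] then b ++ ['k']
    else if sq = [0, 0, 0, 0, 0, 0, 1, 0, 0, 0, 0, 0] then b ++ ['P']
    else if sq = [0, 0, 0, 0, 0, 0, 0, 1, 0, 0, 0, 0] then b ++ ['N']
    else if sq = [0, 0, 0, 0, 0, 0, 0, 0, 1, 0, 0, 0] then b ++ ['B']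
    else if sq = [0, 0, 0, 0, 0, 0, 0, 0, 0, 1, 0, 0] then b ++ ['R']
    else if sq = [0, 0, 0, 0, 0, 0, 0, 0, 0, 0, 1, 0] then b ++ ['Q']
    else if sq = [0, 0, 0, 0, 0, 0, 0, 0, 0, 0, 0, 1] then b ++ ['K']
    else b) = b ++ cppClassifyA sq := by
  unfold cppClassifyA
  simp only [apply_ite (fun (l : List Char) => b ++ l)]
  simp

theorem cppAStep2_eq (b : List Char) (p : Int × List Int) :
    cppAStep2 b p = b ++ (cppClassifyA p.2 ++ (if (p.1 + 1) % 8 == 0 then ['\n'] else [' '])) := by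
  unfold cppAStep2
  rw [cppChain_eq]
  by_cases h : ((p.1 + 1) % 8 == 0) = true <;> simp_all

theorem cppLoop2 (sqs : List (List Int)) : ∀ (k : Nat) (b : List Char),
    (PySem.List.enumerate sqs (k : Int)).foldl cppAStep2 b = b ++ cppRender cppClassifyA sqs k := by
  induction sqs with
  | nil => intro k b; simp [PySem.List.enumerate, cppRender]
  | cons sq rest ih =>
    intro k b
    rw [PySem.List.enumerate_cons, List.foldl_cons, cppAStep2_eq]
    have hk1 : ((k : Int) + 1) = ((k + 1 : Nat) : Int) := by push_cast; ring
    rw [hk1, ih (k+1)]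
    show _ = b ++ (cppClassifyA sq ++ _ ++ _)
    rw [cppSep8 (k+1)]
    simp

theorem cppLoopB (xs : List Int) : ∀ (n j : Nat) (acc : List Char),
    j + n = xs.length / 12 →
    (PySem.List.pyRange (j : Int) ((j + n : Nat) : Int) 1).foldl (cppAltStep xs) acc
      = acc ++ cppRender cppAltPiece (cppChunks12 (xs.drop (12 * j))) j := by
  intro n
  induction n with
  | zero =>
    intro j acc hj
    rw [cppChunks12_nil_of_lt (by simp; omega)]
    simp [PySem.List.pyRange, cppRender]
  | succ n ih =>
    intro j acc hj
    rw [PySem.List.pyRange_one_cons (by push_cast; omega), List.foldl_cons]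
    have hsq : PySem.List.slice xs (some (12 * (j:Int))) (some (12 * (j:Int) + 12))
        = (xs.drop (12 * j)).take 12 := by
      rw [show (12 * (j:Int)) = ((12 * j : Nat) : Int) by push_cast; ring,
          show ((12 * j : Nat) : Int) + 12 = ((12 * j + 12 : Nat) : Int) by push_cast; ring]
      rw [PySem.List.slice_natCast]
      congr 1
      omega
    have hstep : cppAltStep xs acc (j : Int)
        = acc ++ (cppAltPiece ((xs.drop (12 * j)).take 12)
            ++ (if (j + 1) % 8 = 0 then ['\n'] else [' '])) := by
      unfold cppAltStep
      rw [hsq]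
      rw [show ((j:Int) + 1) = ((j + 1 : Nat) : Int) by push_cast; ring, cppSep8 (j+1)]
      simp
    rw [hstep]
    have hcast : ((j:Int) + 1) = (((j + 1 : Nat)) : Int) := by push_cast; ring
    rw [hcast, show ((j + (n+1) : Nat) : Int) = (((j+1) + n : Nat) : Int) by push_cast; ring]
    rw [ih (j+1) _ (by omega)]
    have hlen : 12 ≤ (xs.drop (12 * j)).length := by simp; omega
    rw [show cppChunks12 (xs.drop (12 * j))
          = (xs.drop (12 * j)).take 12 :: cppChunks12 (xs.drop (12 * (j+1))) by
        rw [cppChunks12, if_pos hlen,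
          show (xs.drop (12 * j)).drop 12 = xs.drop (12 * (j+1)) by
            rw [List.drop_drop]; congr 1]]
    show _ = acc ++ (cppAltPiece _ ++ _ ++ cppRender cppAltPiece _ (j+1))
    simp

theorem cppChunks12_len (xs : List Int) : ∀ sq ∈ cppChunks12 xs, sq.length = 12 := by
  fun_induction cppChunks12 xs with
  | case1 xs h ih =>
    intro sq hsq
    rcases List.mem_cons.mp hsq with h' | h'
    · rw [h']; simp; omega
    · exact ih sq h'
  | case2 xs h => intro sq hsq; simp at hsq
theorem cppCount_eq_len_replicate {l : List Int} (h : PySem.List.count l 0 = l.length) :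
    l = List.replicate l.length 0 := by
  rw [PySem.List.count_eq] at h
  rw [List.eq_replicate_iff]
  exact ⟨rfl, fun b hb => (List.count_eq_length.mp h b hb).symm⟩

theorem cppOnehot_struct : ∀ (l : List Int), PySem.List.count l 1 = 1 →
    PySem.List.count l 0 + 1 = l.length →
    ∃ j, PySem.List.index? l 1 = some j ∧
      l = List.replicate j 0 ++ 1 :: List.replicate (l.length - j - 1) 0 := by
  intro l
  induction l with
  | nil => intro h1 _; simp [PySem.List.count_eq] at h1
  | cons x t ih =>
    intro h1 h0
    by_cases hx : x = 1
    · subst hx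
      rw [PySem.List.count_eq, List.count_cons_self] at h1
      have ht1 : List.count 1 t = 0 := by omega
      rw [PySem.List.count_eq, List.count_cons_of_ne (by norm_num)] at h0
      have ht0 : PySem.List.count t 0 = t.length := by rw [PySem.List.count_eq]; simp at h0; omega
      have hrep := cppCount_eq_len_replicate ht0
      refine ⟨0, PySem.List.index?_cons_self 1 t, ?_⟩
      show (1 : Int) :: t = [] ++ 1 :: List.replicate ((1 :: t).length - 0 - 1) 0
      simp only [List.nil_append, List.length_cons, Nat.add_sub_cancel, Nat.sub_zero]
      rw [← hrep]
    · have h1' : PySem.List.count t 1 = 1 := by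
        rw [PySem.List.count_eq] at h1 ⊢
        rwa [List.count_cons_of_ne (a := 1) (b := x) (by omega)] at h1
      have hx0 : x = 0 := by
        by_contra hx0
        have hh : PySem.List.count t 0 = t.length := by
          rw [PySem.List.count_eq] at h0 ⊢
          rw [List.count_cons_of_ne (a := 0) (b := x) (by omega)] at h0
          simp at h0; omega
        have := cppCount_eq_len_replicate hh
        rw [PySem.List.count_eq, this] at h1'
        simp [List.count_replicate] at h1'
      subst hx0
      have h0' : PySem.List.count t 0 + 1 = t.length := by
        rw [PySem.List.count_eq] at h0 ⊢
        rw [List.count_cons_self] at h0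
        simp at h0; omega
      obtain ⟨j, hidx, hrep⟩ := ih h1' h0'
      refine ⟨j + 1, ?_, ?_⟩
      · rw [PySem.List.index?_cons_of_ne (x := (0:Int)) (v := 1) (xs := t) (by norm_num), hidx]; rfl
      · have hjlen : j + 1 ≤ t.length := by
          have := congrArg List.length hrep
          simp at this; omega
        rw [List.replicate_succ, List.cons_append]
        have hlen2 : ((0:Int) :: t).length - (j + 1) - 1 = t.length - j - 1 := by simp
        rw [hlen2, ← hrep]
theorem cppClassify_eq (sq : List Int) (h : sq.length = 12) : cppClassifyA sq = cppAltPiece sq := by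
  by_cases h0 : PySem.List.count sq 0 = 12
  · have hrep := cppCount_eq_len_replicate (l := sq) (by omega)
    rw [h] at hrep
    rw [hrep]
    decide
  · by_cases h1 : PySem.List.count sq 0 = 11 ∧ PySem.List.count sq 1 = 1
    · obtain ⟨j, hidx, hrep⟩ := cppOnehot_struct sq h1.2 (by omega)
      rw [h] at hrep
      have hj : j < 12 := by
        have hlen := congrArg List.length hrep
        simp only [List.length_append, List.length_cons, List.length_replicate] at hlen
        omega
      interval_cases j <;> · rw [hrep]; decide
    · rw [show cppAltPiece sq = [] by unfold cppAltPiece; rw [if_neg h0, if_neg h1]]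
      have c1 : sq ≠ [0, 0, 0, 0, 0, 0, 0, 0, 0, 0, 0, 0] := fun e => h0 (by rw [e]; decide)
      have c2 : sq ≠ [1, 0, 0, 0, 0, 0, 0, 0, 0, 0, 0, 0] := fun e => h1 (by rw [e]; decide)
      have c3 : sq ≠ [0, 1, 0, 0, 0, 0, 0, 0, 0, 0, 0, 0] := fun e => h1 (by rw [e]; decide)
      have c4 : sq ≠ [0, 0, 1, 0, 0, 0, 0, 0, 0, 0, 0, 0] := fun e => h1 (by rw [e]; decide)
      have c5 : sq ≠ [0, 0, 0, 1, 0, 0, 0, 0, 0, 0, 0, 0] := fun e => h1 (by rw [e]; decide)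
      have c6 : sq ≠ [0, 0, 0, 0, 1, 0, 0, 0, 0, 0, 0, 0] := fun e => h1 (by rw [e]; decide)
      have c7 : sq ≠ [0, 0, 0, 0, 0, 1, 0, 0, 0, 0, 0, 0] := fun e => h1 (by rw [e]; decide)
      have c8 : sq ≠ [0, 0, 0, 0, 0, 0, 1, 0, 0, 0, 0, 0] := fun e => h1 (by rw [e]; decide)
      have c9 : sq ≠ [0, 0, 0, 0, 0, 0, 0, 1, 0, 0, 0, 0] := fun e => h1 (by rw [e]; decide)
      have c10 : sq ≠ [0, 0, 0, 0, 0, 0, 0, 0, 1, 0, 0, 0] := fun e => h1 (by rw [e]; decide)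
      have c11 : sq ≠ [0, 0, 0, 0, 0, 0, 0, 0, 0, 1, 0, 0] := fun e => h1 (by rw [e]; decide)
      have c12 : sq ≠ [0, 0, 0, 0, 0, 0, 0, 0, 0, 0, 1, 0] := fun e => h1 (by rw [e]; decide)
      have c13 : sq ≠ [0, 0, 0, 0, 0, 0, 0, 0, 0, 0, 0, 1] := fun e => h1 (by rw [e]; decide)
      simp only [cppClassifyA, if_neg c1, if_neg c2, if_neg c3, if_neg c4, if_neg c5, if_neg c6, if_neg c7, if_neg c8, if_neg c9, if_neg c10, if_neg c11, if_neg c12, if_neg c13]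


theorem cppRender_congr (sqs : List (List Int)) (h : ∀ sq ∈ sqs, sq.length = 12) :
    ∀ k, cppRender cppClassifyA sqs k = cppRender cppAltPiece sqs k := by
  induction sqs with
  | nil => intro k; rfl
  | cons sq rest ih =>
    intro k
    show cppClassifyA sq ++ _ ++ _ = cppAltPiece sq ++ _ ++ _
    rw [cppClassify_eq sq (h sq (by simp)), ih (fun s hs => h s (by simp [hs])) (k+1)]

-- ===== VERDICT (by name: the statement is the Claim_ definition above) =====
theorem convert_position_prediction_spec : Claim_equal_convert_position_prediction := by
  intro xs _
  unfold Spec_convert_position_prediction convert_position_prediction convert_position_prediction_alt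
  show String.mk ((PySem.List.enumerate
      ((PySem.List.enumerate xs).foldl cppAStep1 ([], [])).2).foldl cppAStep2 [])
    = String.mk ((PySem.List.pyRange 0 (PySem.Int.floordiv xs.length 12) 1).foldl (cppAltStep xs) [])
  have h1 := cppLoop1 xs 0 [] [] (by simp)
  simp only [Int.natCast_zero] at h1
  rw [show ((PySem.List.enumerate xs) : List (Int × Int)) = PySem.List.enumerate xs (0:Int) from rfl, h1]
  simp only [List.nil_append]
  have h2 := cppLoop2 (cppChunks12 xs) 0 []
  simp only [Int.natCast_zero] at h2
  have hfd : PySem.Int.floordiv (xs.length : Int) 12 = ((xs.length / 12 : Nat) : Int) := by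
    exact_mod_cast PySem.Int.floordiv_natCast xs.length 12
  have h3 := cppLoopB xs (xs.length / 12) 0 [] (by omega)
  simp only [Int.natCast_zero, Nat.zero_add, Nat.mul_zero, List.drop_zero, List.nil_append] at h3
  rw [h2, hfd, h3, cppRender_congr _ (cppChunks12_len xs) 0]
  simp
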